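-- pv_equiv track=rewrite | github.com/cutehammond772/problem-solving-archive | 백준/Silver/1105. 팔/팔.py | solve
-- ===== SOURCE A (Python) =====
-- def solve(L, R):
--   result = 0
--
--   if len(L) != len(R):
--     return result
--
--   for i in range(len(L)):
--     if L[i] != R[i]:
--       return result
--
--     result += (L[i] == '8')
--
--   return result
-- ===== SOURCE B (Python) =====
-- def solve(L, R):
--     if len(L) != len(R):
--         return 0
--     # Per-position test: position i contributes 1 iff L[i] is '8' AND the whole
--     # prefix up to i still matches R (so no earlier or current mismatch exists).
--     return sum(1 for i in range(len(L)) if L[i] == '8' and L[:i+1] == R[:i+1])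
-- ===== Notes on version B (the rewrite author's own statement) =====
-- stated objective: alternative
-- what changed: Instead of A's single fused mismatch-detecting scan with an accumulator, B decides each index independently: position i counts iff L[i]=='8' and the whole prefix L[:i+1] equals R[:i+1], summed over all indices (per-position prefix-equality tests, no running mismatch state).
import Mathlib
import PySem

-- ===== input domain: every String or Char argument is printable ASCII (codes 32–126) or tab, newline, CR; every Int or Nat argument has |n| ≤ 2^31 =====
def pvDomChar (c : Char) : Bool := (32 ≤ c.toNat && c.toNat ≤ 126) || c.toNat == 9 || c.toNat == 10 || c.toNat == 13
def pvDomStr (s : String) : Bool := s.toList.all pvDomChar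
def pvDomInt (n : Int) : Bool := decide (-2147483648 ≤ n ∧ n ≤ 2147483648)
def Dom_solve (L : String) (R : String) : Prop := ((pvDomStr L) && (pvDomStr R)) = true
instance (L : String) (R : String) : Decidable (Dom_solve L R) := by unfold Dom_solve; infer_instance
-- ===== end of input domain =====

-- B replaces A's fused mismatch-detecting scan by an independent per-position test
-- (count i with L[i]='8' and L[:i+1]=R[:i+1]); objective: alternative algorithm.


-- ===== PORT A =====
-- A's loop: walk both strings position by position, returning the accumulator
-- at the first mismatch, adding 1 for each '8' seen.
def solveLoop : List Char → List Char → Int → Int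
  | a :: as, b :: bs, acc =>
      if a ≠ b then acc
      else solveLoop as bs (acc + (if a = '8' then 1 else 0))
  | _, _, acc => acc

def solve (L : String) (R : String) : Int :=
  if L.toList.length ≠ R.toList.length then 0
  else solveLoop L.toList R.toList 0

-- ===== PORT B =====
-- B's generator-sum: over i in range(len(L)), add 1 iff L[i]=='8' and L[:i+1]==R[:i+1]
-- (L[i] with i in range ported exactly as getD; L[:i+1] with i+1 ≥ 0 is take (i+1)).
def solve_alt (L : String) (R : String) : Int :=
  if L.toList.length ≠ R.toList.length then 0
  else (List.range L.toList.length).foldl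
        (fun acc i =>
          acc + (if L.toList.getD i ' ' = '8' ∧ L.toList.take (i+1) = R.toList.take (i+1)
                 then 1 else 0)) 0

-- ===== PRECONDITION & SPEC =====
def Spec_solve (L : String) (R : String) (out : Int) : Prop := out = solve_alt L R
instance (L : String) (R : String) (out : Int) : Decidable (Spec_solve L R out) := by unfold Spec_solve; infer_instance

-- ===== CLAIM (what is proved, stated in full; the proofs are below) =====
def Claim_equal_solve : Prop := ∀ (L : String) (R : String), Dom_solve L R → Spec_solve L R (solve L R)

-- ===== LEMMAS AND PROOFS =====
-- pull an additive foldl's initial accumulator out front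
theorem foldl_add_out (g : Nat → Int) (l : List Nat) : ∀ acc : Int,
    l.foldl (fun a i => a + g i) acc = acc + l.foldl (fun a i => a + g i) 0 := by
  induction l with
  | nil => simp
  | cons x t ih =>
      intro acc
      simp only [List.foldl_cons]
      rw [ih (acc + g x), ih (0 + g x)]
      ring

-- the fused scan equals the per-position prefix-test sum
theorem solveLoop_eq (as : List Char) : ∀ (bs : List Char) (acc : Int),
    solveLoop as bs acc = acc +
      (List.range as.length).foldl
        (fun acc i =>
          acc + (if as.getD i ' ' = '8' ∧ as.take (i+1) = bs.take (i+1) then 1 else 0)) 0 := by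
  induction as with
  | nil => intro bs acc; simp [solveLoop]
  | cons a as ih =>
      intro bs acc
      cases bs with
      | nil =>
          simp only [solveLoop, List.length_cons, List.range_succ_eq_map, List.foldl_cons,
            List.foldl_map]
          simp
      | cons b bs =>
          simp only [List.length_cons, List.range_succ_eq_map, List.foldl_cons, List.foldl_map,
            List.getD_cons_succ, List.getD_cons_zero, List.take_succ_cons, List.take_zero,
            List.cons.injEq]
          by_cases h : a = b
          · subst h
            simp only [solveLoop, ne_eq, not_true_eq_false, if_false, true_and, and_true,
              ih bs]
            simp only [Nat.succ_eq_add_one]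
            rw [foldl_add_out
                  (fun i => if as.getD i ' ' = '8' ∧ List.take (i+1) as = List.take (i+1) bs
                            then (1:Int) else 0)
                  (List.range as.length) (0 + if a = '8' then (1:Int) else 0)]
            ring
          · simp only [solveLoop, ne_eq, h, not_false_eq_true, if_true]
            simp

-- ===== VERDICT (by name: the statement is the Claim_ definition above) =====
theorem solve_spec : Claim_equal_solve := by
  intro L R _
  unfold Spec_solve solve solve_alt
  split
  · rfl
  · simpa using solveLoop_eq L.toList R.toList 0
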